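-- pv_equiv track=rewrite | github.com/Hitstar53/CSS-Practicals | Exp1/Substitution-Techniques-Attack-2021300108/brute_force_playfair.py | permute_and_decrypt
-- ===== SOURCE A (Python) =====
-- def generate_playfair_square(key):
--     key = key.upper().replace("J", "I")
--     key_builder = []
--     seen = set()
--
--     for c in key:
--         if c not in seen and 'A' <= c <= 'Z':
--             key_builder.append(c)
--             seen.add(c)
--
--     for c in range(ord('A'), ord('Z') + 1):
--         if chr(c) != 'J' and chr(c) not in seen:
--             key_builder.append(chr(c))
--             seen.add(chr(c))
--
--     key_square = [key_builder[i:i + 5] for i in range(0, 25, 5)]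
--     return key_square
--
-- def decrypt_playfair(ciphertext, key_square):
--     plaintext = []
--     digraphs = create_digraphs(ciphertext.upper().replace("J", "I"))
--
--     for digraph in digraphs:
--         pos1 = find_position(key_square, digraph[0])
--         pos2 = find_position(key_square, digraph[1])
--
--         if pos1[0] == pos2[0]:  # Same row
--             plaintext.append(key_square[pos1[0]][(pos1[1] + 4) % 5])
--             plaintext.append(key_square[pos2[0]][(pos2[1] + 4) % 5])
--         elif pos1[1] == pos2[1]:  # Same column
--             plaintext.append(key_square[(pos1[0] + 4) % 5][pos1[1]])
--             plaintext.append(key_square[(pos2[0] + 4) % 5][pos2[1]])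
--         else:  # Rectangle
--             plaintext.append(key_square[pos1[0]][pos2[1]])
--             plaintext.append(key_square[pos2[0]][pos1[1]])
--
--     return ''.join(plaintext)
--
-- def create_digraphs(text):
--     digraphs = []
--     i = 0
--     while i < len(text):
--         if i + 1 < len(text):
--             digraphs.append(text[i] + text[i + 1])
--         else:
--             digraphs.append(text[i] + 'X')
--         i += 2
--     return digraphs
--
-- def find_position(key_square, c):
--     for i, row in enumerate(key_square):
--         for j, char in enumerate(row):
--             if char == c:
--                 return (i, j)
--     return None
--
-- def permute_and_decrypt(characters, prefix, n, ciphertext, expected_plaintext):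
--     if len(prefix) == n:
--         key_square = generate_playfair_square(prefix)
--         plaintext_candidate = decrypt_playfair(ciphertext, key_square)
--         if plaintext_candidate == expected_plaintext:
--             return prefix
--         return None
--
--     for i in range(len(characters)):
--         c = characters.pop(i)
--         found_key = permute_and_decrypt(characters, prefix + c, n, ciphertext, expected_plaintext)
--         characters.insert(i, c)
--         if found_key:
--             return found_key
--
--     return None
-- ===== SOURCE B (Python) =====
-- # Two-phase brute force: generate the full candidate-key list first (no mutation),
-- # then test each against a flat 25-char square with divmod index arithmetic
-- # (objective: alternative; same factorial cost as A's interleaved backtracking).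
--
-- def _square(key):
--     text = key.upper().replace("J", "I")
--     base = [c for c in text if 'A' <= c <= 'Z']
--     alpha = [chr(o) for o in range(ord('A'), ord('Z') + 1) if chr(o) != 'J']
--     return list(dict.fromkeys(base + alpha))
--
-- def _pairs(text):
--     if not text:
--         return []
--     head = (text[0], text[1]) if len(text) > 1 else (text[0], 'X')
--     return [head] + _pairs(text[2:])
--
-- def _decrypt(ciphertext, square):
--     out = []
--     for a, b in _pairs(ciphertext.upper().replace("J", "I")):
--         ia = square.index(a)
--         ib = square.index(b)
--         ra, ca = ia // 5, ia % 5
--         rb, cb = ib // 5, ib % 5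
--         if ra == rb:
--             out += [square[ra * 5 + (ca + 4) % 5], square[rb * 5 + (cb + 4) % 5]]
--         elif ca == cb:
--             out += [square[((ra + 4) % 5) * 5 + ca], square[((rb + 4) % 5) * 5 + cb]]
--         else:
--             out += [square[ra * 5 + cb], square[rb * 5 + ca]]
--     return ''.join(out)
--
-- def _candidates(rem, pref, n):
--     if len(pref) == n:
--         return [pref]
--     res = []
--     for i in range(len(rem)):
--         res += _candidates(rem[:i] + rem[i + 1:], pref + rem[i], n)
--     return res
--
-- def permute_and_decrypt(characters, prefix, n, ciphertext, expected_plaintext):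
--     for key in _candidates(list(characters), prefix, n):
--         if _decrypt(ciphertext, _square(key)) == expected_plaintext:
--             return key
--     return None
-- ===== Notes on version B (the rewrite author's own statement) =====
-- stated objective: alternative
-- what changed: B replaces A's interleaved recursive pop/insert backtracking with a two-phase search (build the full candidate-key list without mutation, then scan it for the first key that decrypts correctly) and replaces the 5x5 row/column square with scan-based position lookup by a flat 25-character square built by one ordered dedup (dict.fromkeys) with list.index plus divmod index arithmetic.
import Mathlib
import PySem

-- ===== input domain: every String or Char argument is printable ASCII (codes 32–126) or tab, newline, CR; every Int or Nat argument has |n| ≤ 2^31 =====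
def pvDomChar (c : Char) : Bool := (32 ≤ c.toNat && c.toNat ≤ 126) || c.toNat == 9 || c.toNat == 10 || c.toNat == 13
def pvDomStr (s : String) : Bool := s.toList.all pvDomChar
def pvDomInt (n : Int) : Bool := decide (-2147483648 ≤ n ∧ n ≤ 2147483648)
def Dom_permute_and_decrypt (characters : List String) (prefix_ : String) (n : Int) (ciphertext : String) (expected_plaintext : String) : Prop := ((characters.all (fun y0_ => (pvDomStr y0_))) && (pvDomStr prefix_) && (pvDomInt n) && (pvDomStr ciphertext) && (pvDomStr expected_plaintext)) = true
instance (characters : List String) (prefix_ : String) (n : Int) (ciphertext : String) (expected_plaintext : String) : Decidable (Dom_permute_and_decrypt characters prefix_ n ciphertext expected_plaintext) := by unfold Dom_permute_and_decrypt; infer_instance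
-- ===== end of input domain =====

-- B is a two-phase re-implementation: it first builds the whole candidate-key list
-- (no list mutation; A pops/reinserts in place but restores `characters` before
-- returning, so only the return value is compared) and then tests each candidate
-- against a FLAT 25-character square with divmod index arithmetic, where A
-- interleaves testing with backtracking over a 5×5 row/column square.
-- (objective: alternative — same factorial cost)

-- ===== PORT A =====

-- key.upper().replace("J", "I")
def upperJI (s : List Char) : List Char :=
  PySem.Chars.replace (PySem.Chars.upper s) ['J'] ['I']

-- first loop of generate_playfair_square: dedup the filtered key characters
def gpsKeyLoop : List Char → List Char → PySem.Set Char → (List Char × PySem.Set Char)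
  | [], kb, seen => (kb, seen)
  | c :: rest, kb, seen =>
    if ¬ (PySem.Set.contains seen c) ∧ 'A' ≤ c ∧ c ≤ 'Z' then
      gpsKeyLoop rest (kb ++ [c]) (PySem.Set.add seen c)
    else gpsKeyLoop rest kb seen

-- second loop: append the unused alphabet letters (skipping 'J')
def gpsFillLoop : List Int → List Char → PySem.Set Char → List Char
  | [], kb, _ => kb
  | code :: rest, kb, seen =>
    let ch := Char.ofNat code.toNat          -- chr(code); exact for the codes 65..90 used here
    if ch ≠ 'J' ∧ ¬ (PySem.Set.contains seen ch) then
      gpsFillLoop rest (kb ++ [ch]) (PySem.Set.add seen ch)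
    else gpsFillLoop rest kb seen

def generatePlayfairSquare (key : String) : List (List Char) :=
  let k := upperJI key.toList
  let bs := gpsKeyLoop k [] PySem.Set.empty
  let kb := gpsFillLoop (PySem.List.pyRange 65 91 1) bs.1 bs.2
  (PySem.List.pyRange 0 25 5).map (fun i => PySem.List.slice kb (some i) (some (i + 5)))

-- create_digraphs: the while loop consumes two characters per step; a digraph
-- (a 2-character Python string) is represented exactly by a pair of characters
def createDigraphs : List Char → List (Char × Char)
  | [] => []
  | [c] => [(c, 'X')]
  | c :: d :: rest => (c, d) :: createDigraphs rest

def findInRow : List Char → Char → Nat → Option Nat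
  | [], _, _ => none
  | x :: rest, c, j => if x = c then some j else findInRow rest c (j + 1)

-- find_position (the enumerate indices are carried explicitly)
def findPosition : List (List Char) → Char → Nat → Option (Nat × Nat)
  | [], _, _ => none
  | row :: rows, c, i =>
    match findInRow row c 0 with
    | some j => some (i, j)
    | none => findPosition rows c (i + 1)

-- key_square[i][j]; the indices produced by findPosition are always in range,
-- so the defaults are never consulted
def sqGet (sq : List (List Char)) (i j : Nat) : Char := (sq.getD i []).getD j 'A'

-- the for-loop of decrypt_playfair; `none` = find_position returned None, where
-- Python raises TypeError (such inputs are excluded by Pre_)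
def decryptPairs (sq : List (List Char)) : List (Char × Char) → Option (List Char)
  | [] => some []
  | (a, b) :: rest =>
    match findPosition sq a 0, findPosition sq b 0 with
    | some p1, some p2 =>
      let two :=
        if p1.1 = p2.1 then
          [sqGet sq p1.1 ((p1.2 + 4) % 5), sqGet sq p2.1 ((p2.2 + 4) % 5)]
        else if p1.2 = p2.2 then
          [sqGet sq ((p1.1 + 4) % 5) p1.2, sqGet sq ((p2.1 + 4) % 5) p2.2]
        else
          [sqGet sq p1.1 p2.2, sqGet sq p2.1 p1.2]
      (decryptPairs sq rest).map (fun tl => two ++ tl)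
    | _, _ => none

def decryptPlayfair (ciphertext : String) (sq : List (List Char)) : Option String :=
  (decryptPairs sq (createDigraphs (upperJI ciphertext.toList))).map String.ofList

-- A's recursion; pdLoop is A's `for i in range(len(characters))` loop: the list with
-- element i popped is left ++ rest, and `insert` restores it for the next iteration.
-- `if found_key:` is Python truthiness: a returned "" would be falsy, hence the k = "" test.
mutual
def pdGo (n : Int) (cipher expected : String) (chars : List String) (pref : String) : Option String :=
  if PySem.Str.len pref = n then
    match decryptPlayfair cipher (generatePlayfairSquare pref) with
    | some pt => if pt = expected then some pref else none
    | none => none     -- Python raises TypeError here; excluded by Pre_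
  else pdLoop n cipher expected [] chars pref
termination_by (chars.length, 1, 0)
decreasing_by all_goals simp [Prod.lex_iff]

def pdLoop (n : Int) (cipher expected : String) (left right : List String) (pref : String) : Option String :=
  match right with
  | [] => none
  | c :: rest =>
    match pdGo n cipher expected (left ++ rest) (pref ++ c) with
    | some k => if k = "" then pdLoop n cipher expected (left ++ [c]) rest pref else some k
    | none => pdLoop n cipher expected (left ++ [c]) rest pref
termination_by (left.length + right.length, 0, right.length)
decreasing_by all_goals (simp [Prod.lex_iff, List.length_append]; try omega)
end

def permute_and_decrypt (characters : List String) (prefix_ : String) (n : Int) (ciphertext : String) (expected_plaintext : String) : Option String :=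
  pdGo n ciphertext expected_plaintext characters prefix_

-- ===== PORT B =====

-- text.upper().replace("J", "I")  (B's own normalisation helper)
def normB (s : List Char) : List Char :=
  PySem.Chars.replace (PySem.Chars.upper s) ['J'] ['I']

-- _square: flat 25-character square via ordered dedup (dict.fromkeys)
def squareB (key : String) : List Char :=
  let base := (normB key.toList).filter (fun c => decide ('A' ≤ c ∧ c ≤ 'Z'))
  let alpha := ((PySem.List.pyRange 65 91 1).filter
      (fun o => decide (Char.ofNat o.toNat ≠ 'J'))).map (fun o => Char.ofNat o.toNat)
  PySem.List.dedup (base ++ alpha)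

-- _pairs (recursive digraph builder; a 2-char Python string is a pair of chars)
def pairsB : List Char → List (Char × Char)
  | [] => []
  | [a] => [(a, 'X')]
  | a :: b :: rest => (a, b) :: pairsB rest

-- the for-loop of _decrypt; square.index raises ValueError where index? is none
-- (excluded by Pre_); ia // 5 and ia % 5 on the nonnegative index are Nat div/mod
def decPairsB (sq : List Char) : List (Char × Char) → Option (List Char)
  | [] => some []
  | (a, b) :: rest =>
    match PySem.List.index? sq a, PySem.List.index? sq b with
    | some ia, some ib =>
      let ra := ia / 5; let ca := ia % 5
      let rb := ib / 5; let cb := ib % 5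
      let two :=
        if ra = rb then
          [sq.getD (ra * 5 + (ca + 4) % 5) 'A', sq.getD (rb * 5 + (cb + 4) % 5) 'A']
        else if ca = cb then
          [sq.getD (((ra + 4) % 5) * 5 + ca) 'A', sq.getD (((rb + 4) % 5) * 5 + cb) 'A']
        else
          [sq.getD (ra * 5 + cb) 'A', sq.getD (rb * 5 + ca) 'A']
      (decPairsB sq rest).map (fun tl => two ++ tl)
    | _, _ => none

def decryptB (ciphertext : String) (sq : List Char) : Option String :=
  (decPairsB sq (pairsB (normB ciphertext.toList))).map String.ofList

-- _candidates: build the full list of candidate keys (rem[:i] + rem[i+1:] is left ++ rest)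
mutual
def candsB (rem : List String) (pref : String) (n : Int) : List String :=
  if PySem.Str.len pref = n then [pref]
  else candsLoopB [] rem pref n
termination_by (rem.length, 1, 0)
decreasing_by all_goals simp [Prod.lex_iff]

def candsLoopB (left right : List String) (pref : String) (n : Int) : List String :=
  match right with
  | [] => []
  | c :: rest =>
    candsB (left ++ rest) (pref ++ c) n ++ candsLoopB (left ++ [c]) rest pref n
termination_by (left.length + right.length, 0, right.length)
decreasing_by all_goals (simp [Prod.lex_iff, List.length_append]; try omega)
end

def permute_and_decrypt_alt (characters : List String) (prefix_ : String) (n : Int) (ciphertext : String) (expected_plaintext : String) : Option String :=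
  (candsB characters prefix_ n).find? (fun key =>
    match decryptB ciphertext (squareB key) with
    | some pt => pt == expected_plaintext
    | none => false)

-- ===== PRECONDITION & SPEC =====
-- Pre_ excludes exactly the inputs on which A raises (TypeError): the ciphertext contains
-- a character that is not an ASCII letter, and some selection of elements of `characters`
-- extends prefix_ to total length exactly n — then the first candidate key of length n is
-- decrypted and find_position returns None for that ciphertext character. On every other
-- input A returns normally. (The equivalence of the two ports actually holds on every
-- input, because both ports render Python's raise as the same `none` branch; Pre_ marks
-- where the ports model Python's returned value.)
def Pre_permute_and_decrypt (characters : List String) (prefix_ : String) (n : Int) (ciphertext : String) (expected_plaintext : String) : Prop :=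
  (ciphertext.toList.all (fun c => c.isAlpha)
    || !(characters.sublists.any (fun s =>
          PySem.Str.len prefix_ + (s.map PySem.Str.len).sum == n))) = true

instance (characters : List String) (prefix_ : String) (n : Int) (ciphertext : String) (expected_plaintext : String) : Decidable (Pre_permute_and_decrypt characters prefix_ n ciphertext expected_plaintext) := by unfold Pre_permute_and_decrypt; infer_instance

def pvWitness_permute_and_decrypt : List String × String × Int × String × String :=
  (["B", "A"], "", 2, "AB", "BA")

def Spec_permute_and_decrypt (characters : List String) (prefix_ : String) (n : Int) (ciphertext : String) (expected_plaintext : String) (out : Option String) : Prop := out = permute_and_decrypt_alt characters prefix_ n ciphertext expected_plaintext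
instance (characters : List String) (prefix_ : String) (n : Int) (ciphertext : String) (expected_plaintext : String) (out : Option String) : Decidable (Spec_permute_and_decrypt characters prefix_ n ciphertext expected_plaintext out) := by unfold Spec_permute_and_decrypt; infer_instance

-- ===== CLAIM (what is proved, stated in full; the proofs are below) =====
def Claim_equal_permute_and_decrypt : Prop := ∀ (characters : List String) (prefix_ : String) (n : Int) (ciphertext : String) (expected_plaintext : String), Dom_permute_and_decrypt characters prefix_ n ciphertext expected_plaintext → Pre_permute_and_decrypt characters prefix_ n ciphertext expected_plaintext → Spec_permute_and_decrypt characters prefix_ n ciphertext expected_plaintext (permute_and_decrypt characters prefix_ n ciphertext expected_plaintext)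

-- ===== LEMMAS AND PROOFS =====

-- unfolding equations for the mutual recursions
theorem pdLoop_nil (n : Int) (cipher expected : String) (left : List String) (pref : String) :
    pdLoop n cipher expected left [] pref = none := by
  conv_lhs => unfold pdLoop

theorem pdLoop_cons (n : Int) (cipher expected : String) (left : List String) (c : String)
    (rest : List String) (pref : String) :
    pdLoop n cipher expected left (c :: rest) pref =
      (match pdGo n cipher expected (left ++ rest) (pref ++ c) with
       | some k => if k = "" then pdLoop n cipher expected (left ++ [c]) rest pref else some k
       | none => pdLoop n cipher expected (left ++ [c]) rest pref) := by
  conv_lhs => unfold pdLoop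

theorem pdGo_eq (n : Int) (cipher expected : String) (chars : List String) (pref : String) :
    pdGo n cipher expected chars pref =
      (if PySem.Str.len pref = n then
        match decryptPlayfair cipher (generatePlayfairSquare pref) with
        | some pt => if pt = expected then some pref else none
        | none => none
      else pdLoop n cipher expected [] chars pref) := by
  conv_lhs => unfold pdGo

theorem candsLoopB_nil (left : List String) (pref : String) (n : Int) :
    candsLoopB left [] pref n = [] := by
  conv_lhs => unfold candsLoopB

theorem candsLoopB_cons (left : List String) (c : String) (rest : List String) (pref : String) (n : Int) :
    candsLoopB left (c :: rest) pref n =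
      candsB (left ++ rest) (pref ++ c) n ++ candsLoopB (left ++ [c]) rest pref n := by
  conv_lhs => unfold candsLoopB

theorem candsB_eq (rem : List String) (pref : String) (n : Int) :
    candsB rem pref n =
      (if PySem.Str.len pref = n then [pref] else candsLoopB [] rem pref n) := by
  conv_lhs => unfold candsB

-- replace with the single-character pattern "J" → "I" is a map
theorem replace_single_go (fuel : Nat) : ∀ (l acc : List Char), l.length ≤ fuel →
    PySem.Chars.replace.go ['J'] ['I'] fuel l acc =
      acc.reverse ++ l.map (fun c => if c = 'J' then 'I' else c) := by
  induction fuel with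
  | zero =>
    intro l acc h
    have : l = [] := List.length_eq_zero_iff.mp (Nat.le_zero.mp h)
    subst this
    simp [PySem.Chars.replace.go]
  | succ fuel ih =>
    intro l acc h
    cases l with
    | nil => simp [PySem.Chars.replace.go]
    | cons c t =>
      rw [show PySem.Chars.replace.go ['J'] ['I'] (fuel+1) (c :: t) acc =
          (if List.isPrefixOf ['J'] (c :: t) then
            PySem.Chars.replace.go ['J'] ['I'] fuel (List.drop (['J'] : List Char).length (c :: t)) (['I'].reverse ++ acc)
          else PySem.Chars.replace.go ['J'] ['I'] fuel t (c :: acc)) from rfl]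
      by_cases hc : c = 'J'
      · subst hc
        rw [if_pos (by simp [List.isPrefixOf])]
        simp only [List.length_cons, List.length_nil, List.drop_succ_cons, List.drop_zero]
        rw [ih t _ (by simpa using h)]
        simp
      · rw [if_neg (by simp [List.isPrefixOf]; intro h'; exact hc h'.symm)]
        rw [ih t _ (by simpa using h)]
        simp [hc]

theorem replaceJI_eq_map (s : List Char) :
    PySem.Chars.replace s ['J'] ['I'] = s.map (fun c => if c = 'J' then 'I' else c) := by
  rw [show PySem.Chars.replace s ['J'] ['I'] =
      PySem.Chars.replace.go ['J'] ['I'] s.length s [] from rfl]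
  rw [replace_single_go s.length s [] le_rfl]
  simp

theorem noJ_normB (s : List Char) : 'J' ∉ normB s := by
  unfold normB
  rw [replaceJI_eq_map]
  intro hmem
  obtain ⟨c, _, hc⟩ := List.mem_map.mp hmem
  by_cases h : c = 'J' <;> simp [h] at hc

-- A's first square loop, run with seen = kb, is the fold of Set.add over the filtered key
theorem keyLoop_eq (cs : List Char) : ∀ kb : List Char,
    gpsKeyLoop cs kb kb =
      (((cs.filter (fun c => decide ('A' ≤ c ∧ c ≤ 'Z'))).foldl PySem.Set.add kb),
       ((cs.filter (fun c => decide ('A' ≤ c ∧ c ≤ 'Z'))).foldl PySem.Set.add kb)) := by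
  induction cs with
  | nil => intro kb; simp [gpsKeyLoop]
  | cons c rest ih =>
    intro kb
    by_cases hL : 'A' ≤ c ∧ c ≤ 'Z'
    · by_cases hc : c ∈ kb
      · rw [show gpsKeyLoop (c :: rest) kb kb = gpsKeyLoop rest kb kb from by
            simp [gpsKeyLoop, hc, hL]]
        rw [ih kb]
        have : PySem.Set.add kb c = kb := by simp [PySem.Set.add, hc]
        simp [hL, this]
      · rw [show gpsKeyLoop (c :: rest) kb kb =
            gpsKeyLoop rest (kb ++ [c]) (PySem.Set.add kb c) from by
            simp [gpsKeyLoop, hc, hL]]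
        have hadd : PySem.Set.add kb c = kb ++ [c] := by simp [PySem.Set.add, hc]
        rw [← hadd, ih (PySem.Set.add kb c)]
        simp [hL, hadd]
    · rw [show gpsKeyLoop (c :: rest) kb kb = gpsKeyLoop rest kb kb from by
          simp [gpsKeyLoop, hL]]
      rw [ih kb]
      simp [hL]

-- A's fill loop, run with seen = kb, is the fold of Set.add over the non-J letters
theorem fillLoop_eq (codes : List Int) : ∀ kb : List Char,
    gpsFillLoop codes kb kb =
      ((codes.filter (fun o => decide (Char.ofNat o.toNat ≠ 'J'))).map
        (fun o => Char.ofNat o.toNat)).foldl PySem.Set.add kb := by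
  induction codes with
  | nil => intro kb; simp [gpsFillLoop]
  | cons code rest ih =>
    intro kb
    by_cases hJ : Char.ofNat code.toNat ≠ 'J'
    · by_cases hc : Char.ofNat code.toNat ∈ kb
      · rw [show gpsFillLoop (code :: rest) kb kb = gpsFillLoop rest kb kb from by
            simp [gpsFillLoop, hc, hJ]]
        rw [ih kb]
        have : PySem.Set.add kb (Char.ofNat code.toNat) = kb := by simp [PySem.Set.add, hc]
        simp [hJ, this]
      · rw [show gpsFillLoop (code :: rest) kb kb =
            gpsFillLoop rest (kb ++ [Char.ofNat code.toNat])
              (PySem.Set.add kb (Char.ofNat code.toNat)) from by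
            simp [gpsFillLoop, hc, hJ]]
        have hadd : PySem.Set.add kb (Char.ofNat code.toNat) = kb ++ [Char.ofNat code.toNat] := by
          simp [PySem.Set.add, hc]
        rw [← hadd, ih (PySem.Set.add kb (Char.ofNat code.toNat))]
        simp [hJ, hadd]
    · rw [show gpsFillLoop (code :: rest) kb kb = gpsFillLoop rest kb kb from by
          simp [gpsFillLoop, hJ]]
      rw [ih kb]
      simp [hJ]

-- the key square A builds is (the 5×5 chunking of) B's flat square
theorem kb_eq (key : String) :
    gpsFillLoop (PySem.List.pyRange 65 91 1)
      (gpsKeyLoop (upperJI key.toList) [] PySem.Set.empty).1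
      (gpsKeyLoop (upperJI key.toList) [] PySem.Set.empty).2 = squareB key := by
  have h0 : (PySem.Set.empty : PySem.Set Char) = ([] : List Char) := rfl
  rw [h0, keyLoop_eq]
  rw [fillLoop_eq]
  show _ = squareB key
  unfold squareB
  rw [PySem.List.dedup_eq_ofList, PySem.Set.ofList_eq_foldl, List.foldl_append]
  rfl

theorem generatePlayfairSquare_eq (key : String) :
    generatePlayfairSquare key =
      (PySem.List.pyRange 0 25 5).map
        (fun i => PySem.List.slice (squareB key) (some i) (some (i + 5))) := by
  show (PySem.List.pyRange 0 25 5).map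
      (fun i => PySem.List.slice
        (gpsFillLoop (PySem.List.pyRange 65 91 1)
          (gpsKeyLoop (upperJI key.toList) [] PySem.Set.empty).1
          (gpsKeyLoop (upperJI key.toList) [] PySem.Set.empty).2)
        (some i) (some (i + 5))) = _
  rw [kb_eq]

-- B's flat square has exactly 25 characters
theorem mem_alphaB (c : Char) (h1 : 'A' ≤ c) (h2 : c ≤ 'Z') (h3 : c ≠ 'J') :
    c ∈ ((PySem.List.pyRange 65 91 1).filter
        (fun o => decide (Char.ofNat o.toNat ≠ 'J'))).map (fun o => Char.ofNat o.toNat) := by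
  have hA : 65 ≤ c.toNat := h1
  have hZ : c.toNat ≤ 90 := h2
  have hofNat : Char.ofNat c.toNat = c := Char.ofNat_toNat c
  apply List.mem_map.mpr
  refine ⟨(c.toNat : Int), List.mem_filter.mpr ⟨?_, ?_⟩, ?_⟩
  · exact PySem.List.mem_pyRange_one.mpr (by omega)
  · simp only [Int.toNat_natCast, hofNat]
    exact decide_eq_true h3
  · simp only [Int.toNat_natCast, hofNat]

theorem squareB_length (key : String) : (squareB key).length = 25 := by
  have hdef : squareB key =
      PySem.List.dedup
        (((normB key.toList).filter (fun c => decide ('A' ≤ c ∧ c ≤ 'Z'))) ++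
          ((PySem.List.pyRange 65 91 1).filter
            (fun o => decide (Char.ofNat o.toNat ≠ 'J'))).map (fun o => Char.ofNat o.toNat)) := rfl
  have nd : (squareB key).Nodup := by rw [hdef]; exact PySem.List.nodup_dedup _
  have hfin : (squareB key).toFinset =
      (((normB key.toList).filter (fun c => decide ('A' ≤ c ∧ c ≤ 'Z'))) ++
        ((PySem.List.pyRange 65 91 1).filter
          (fun o => decide (Char.ofNat o.toNat ≠ 'J'))).map (fun o => Char.ofNat o.toNat)).toFinset := by
    rw [hdef]
    ext x
    simp
  have hsub : (((normB key.toList).filter (fun c => decide ('A' ≤ c ∧ c ≤ 'Z')))).toFinset ⊆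
      (((PySem.List.pyRange 65 91 1).filter
        (fun o => decide (Char.ofNat o.toNat ≠ 'J'))).map (fun o => Char.ofNat o.toNat)).toFinset := by
    intro x hx
    rw [List.mem_toFinset] at hx ⊢
    obtain ⟨hxmem, hxp⟩ := List.mem_filter.mp hx
    have hxL : 'A' ≤ x ∧ x ≤ 'Z' := of_decide_eq_true hxp
    exact mem_alphaB x hxL.1 hxL.2 (by intro h; exact noJ_normB key.toList (h ▸ hxmem))
  have hcard : (squareB key).toFinset.card = 25 := by
    rw [hfin, List.toFinset_append, Finset.union_eq_right.mpr hsub]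
    decide
  rw [← List.toFinset_card_of_nodup nd, hcard]

-- _pairs is create_digraphs
theorem pairsB_eq (t : List Char) : pairsB t = createDigraphs t := by
  induction t using pairsB.induct with
  | case1 => simp [pairsB, createDigraphs]
  | case2 a => simp [pairsB, createDigraphs]
  | case3 a b rest ih => simp [pairsB, createDigraphs, ih]

-- findInRow is index? within a row
theorem findInRow_eq (r : List Char) : ∀ (c : Char) (j : Nat),
    findInRow r c j = (PySem.List.index? r c).map (· + j) := by
  induction r with
  | nil =>
    intro c j
    rw [(PySem.List.index?_eq_none_iff _ _).mpr (List.not_mem_nil)]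
    simp [findInRow]
  | cons x rest ih =>
    intro c j
    by_cases hx : x = c
    · subst hx
      rw [PySem.List.index?_cons_self]
      simp [findInRow]
    · rw [show findInRow (x :: rest) c j = findInRow rest c (j + 1) from by
        simp [findInRow, hx]]
      rw [PySem.List.index?_cons_of_ne rest hx, ih c (j + 1)]
      cases PySem.List.index? rest c with
      | none => simp
      | some k => simp; omega

-- index? over an append, when the element is not in the first part
theorem index?_append_not_mem {l : List Char} (t : List Char) {c : Char} (h : c ∉ l) :
    PySem.List.index? (l ++ t) c = (PySem.List.index? t c).map (· + l.length) := by
  induction l with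
  | nil => simp
  | cons x l ih =>
    have hx : x ≠ c := by rintro rfl; exact h (List.mem_cons_self)
    rw [List.cons_append, PySem.List.index?_cons_of_ne (l ++ t) hx,
      ih (fun hc => h (List.mem_cons_of_mem _ hc))]
    cases PySem.List.index? t c with
    | none => simp
    | some k => simp; omega

-- one chunk row of the position scan
theorem pos_step (xs : List Char) (rows : List (List Char)) (i : Nat) (c : Char)
    (hrec : findPosition rows c (i + 1) =
      (PySem.List.index? (xs.drop 5) c).map (fun k => (i + 1 + k / 5, k % 5))) :
    findPosition (xs.take 5 :: rows) c i =
      (PySem.List.index? xs c).map (fun k => (i + k / 5, k % 5)) := by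
  by_cases hc : c ∈ xs.take 5
  · obtain ⟨j, hj⟩ := Option.isSome_iff_exists.mp
      ((PySem.List.index?_isSome_iff (xs.take 5) c).mpr hc)
    obtain ⟨hjlt, -, -⟩ := PySem.List.getElem_of_index?_eq_some hj
    have hj5 : j < 5 := lt_of_lt_of_le hjlt (by simp)
    have hxs : PySem.List.index? xs c = some j := by
      conv_lhs => rw [← List.take_append_drop 5 xs]
      rw [PySem.List.index?_append_of_mem _ hc, hj]
    rw [hxs, show findPosition (xs.take 5 :: rows) c i =
        (match findInRow (xs.take 5) c 0 with
         | some j => some (i, j)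
         | none => findPosition rows c (i + 1)) from rfl,
      findInRow_eq, hj]
    simp only [Option.map_some]
    have h1 : j / 5 = 0 := by omega
    have h2 : j % 5 = j := by omega
    simp [h1, h2]
  · have hnone : PySem.List.index? (xs.take 5) c = none :=
      (PySem.List.index?_eq_none_iff _ _).mpr hc
    rw [show findPosition (xs.take 5 :: rows) c i =
        (match findInRow (xs.take 5) c 0 with
         | some j => some (i, j)
         | none => findPosition rows c (i + 1)) from rfl,
      findInRow_eq, hnone]
    simp only [Option.map_none]
    rw [hrec]
    by_cases hlen : xs.length ≤ 5
    · have hd : xs.drop 5 = [] := List.drop_eq_nil_of_le hlen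
      have hx : c ∉ xs := by rwa [List.take_of_length_le hlen] at hc
      rw [hd, (PySem.List.index?_eq_none_iff _ _).mpr hx,
        (PySem.List.index?_eq_none_iff _ _).mpr (List.not_mem_nil)]
      rfl
    · rw [Nat.not_le] at hlen
      have htk : (xs.take 5).length = 5 := by simp; omega
      have hxx : PySem.List.index? xs c =
          (PySem.List.index? (xs.drop 5) c).map (· + (xs.take 5).length) := by
        conv_lhs => rw [← List.take_append_drop 5 xs]
        exact index?_append_not_mem _ hc
      rw [hxx, htk]
      cases PySem.List.index? (xs.drop 5) c with
      | none => simp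
      | some k =>
        simp only [Option.map_some, Option.some.injEq, Prod.mk.injEq]
        constructor <;> omega

-- find_position over the 5×5 chunking is divmod of the flat index
-- the five chunk rows, written as drop/take
theorem rows_eq (flat : List Char) :
    (PySem.List.pyRange 0 25 5).map
        (fun i => PySem.List.slice flat (some i) (some (i + 5))) =
      [flat.take 5, (flat.drop 5).take 5, (flat.drop 10).take 5,
       (flat.drop 15).take 5, (flat.drop 20).take 5] := by
  have hr : PySem.List.pyRange 0 25 5 = [0, 5, 10, 15, 20] := by decide
  have key : ∀ m : Nat, PySem.List.slice flat (some (m : Int)) (some ((m : Int) + ((5 : Nat) : Int))) =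
      (flat.drop m).take 5 := by
    intro m
    rw [show ((m : Int) + ((5 : Nat) : Int)) = ((m + 5 : Nat) : Int) by push_cast; ring,
      PySem.List.slice_natCast]
    simp
  rw [hr]
  simp only [List.map]
  rw [show ((0 : Int)) = ((0 : Nat) : Int) from rfl, show ((5 : Int)) = ((5 : Nat) : Int) from rfl,
    show ((10 : Int)) = ((10 : Nat) : Int) from rfl, show ((15 : Int)) = ((15 : Nat) : Int) from rfl,
    show ((20 : Int)) = ((20 : Nat) : Int) from rfl, key 0, key 5, key 10, key 15, key 20]
  simp

theorem pos_eq (flat : List Char) (h : flat.length ≤ 25) (c : Char) :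
    findPosition ((PySem.List.pyRange 0 25 5).map
        (fun i => PySem.List.slice flat (some i) (some (i + 5)))) c 0 =
      (PySem.List.index? flat c).map (fun k => (k / 5, k % 5)) := by
  rw [rows_eq]
  have hdd : ∀ m : Nat, (flat.drop m).drop 5 = flat.drop (m + 5) := by
    intro m; rw [List.drop_drop]
  have h25 : flat.drop 25 = [] := List.drop_eq_nil_of_le h
  have st4 : findPosition [(flat.drop 20).take 5] c 4 =
      (PySem.List.index? (flat.drop 20) c).map (fun k => (4 + k / 5, k % 5)) := by
    apply pos_step
    rw [hdd 20, h25, (PySem.List.index?_eq_none_iff _ _).mpr (List.not_mem_nil)]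
    rfl
  have st3 : findPosition [(flat.drop 15).take 5, (flat.drop 20).take 5] c 3 =
      (PySem.List.index? (flat.drop 15) c).map (fun k => (3 + k / 5, k % 5)) := by
    apply pos_step; rw [hdd 15]; exact st4
  have st2 : findPosition
      [(flat.drop 10).take 5, (flat.drop 15).take 5, (flat.drop 20).take 5] c 2 =
      (PySem.List.index? (flat.drop 10) c).map (fun k => (2 + k / 5, k % 5)) := by
    apply pos_step; rw [hdd 10]; exact st3
  have st1 : findPosition [(flat.drop 5).take 5, (flat.drop 10).take 5,
      (flat.drop 15).take 5, (flat.drop 20).take 5] c 1 =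
      (PySem.List.index? (flat.drop 5) c).map (fun k => (1 + k / 5, k % 5)) := by
    apply pos_step; rw [hdd 5]; exact st2
  have st0 : findPosition [flat.take 5, (flat.drop 5).take 5, (flat.drop 10).take 5,
      (flat.drop 15).take 5, (flat.drop 20).take 5] c 0 =
      (PySem.List.index? flat c).map (fun k => (0 + k / 5, k % 5)) := by
    apply pos_step
    rw [show flat.drop 5 = flat.drop 5 from rfl]
    exact st1
  rw [st0]
  simp

-- indexing a chunk row is flat indexing
theorem sqGet_eq (flat : List Char) (i j : Nat) (hi : i < 5) (hj : j < 5) :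
    sqGet ((PySem.List.pyRange 0 25 5).map
        (fun i => PySem.List.slice flat (some i) (some (i + 5)))) i j =
      flat.getD (i * 5 + j) 'A' := by
  rw [rows_eq]
  have hrow : ∀ m : Nat, ((flat.drop m).take 5).getD j 'A' = flat.getD (m + j) 'A' := by
    intro m
    rw [List.getD_eq_getElem?_getD, List.getElem?_take, if_pos hj, List.getElem?_drop,
      List.getD_eq_getElem?_getD]
  have hrow0 : (flat.take 5).getD j 'A' = flat.getD (0 + j) 'A' := by
    have h0 := hrow 0
    rwa [List.drop_zero] at h0
  interval_cases i
  · simp only [sqGet, List.getD_cons_zero]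
    rw [hrow0, show 0 + j = 0 * 5 + j from by omega]
  · simp only [sqGet, List.getD_cons_zero, List.getD_cons_succ]
    rw [hrow 5, show 5 + j = 1 * 5 + j from by omega]
  · simp only [sqGet, List.getD_cons_zero, List.getD_cons_succ]
    rw [hrow 10, show 10 + j = 2 * 5 + j from by omega]
  · simp only [sqGet, List.getD_cons_zero, List.getD_cons_succ]
    rw [hrow 15, show 15 + j = 3 * 5 + j from by omega]
  · simp only [sqGet, List.getD_cons_zero, List.getD_cons_succ]
    rw [hrow 20, show 20 + j = 4 * 5 + j from by omega]

-- the two decryption loops agree on any flat square of length ≤ 25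
theorem decPairs_eq (flat : List Char) (h : flat.length ≤ 25) : ∀ ps : List (Char × Char),
    decryptPairs ((PySem.List.pyRange 0 25 5).map
        (fun i => PySem.List.slice flat (some i) (some (i + 5)))) ps =
      decPairsB flat ps := by
  intro ps
  induction ps with
  | nil => rfl
  | cons p rest ih =>
    obtain ⟨a, b⟩ := p
    simp only [decryptPairs, decPairsB]
    rw [pos_eq flat h a, pos_eq flat h b]
    cases ha : PySem.List.index? flat a with
    | none =>
      cases hb : PySem.List.index? flat b with
      | none => rfl
      | some kb => rfl
    | some ka =>
      cases hb : PySem.List.index? flat b with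
      | none => rfl
      | some kb =>
        obtain ⟨hka, -, -⟩ := PySem.List.getElem_of_index?_eq_some ha
        obtain ⟨hkb, -, -⟩ := PySem.List.getElem_of_index?_eq_some hb
        have hka25 : ka < 25 := lt_of_lt_of_le hka h
        have hkb25 : kb < 25 := lt_of_lt_of_le hkb h
        simp only [Option.map_some]
        rw [ih]
        congr 1
        funext tl
        congr 1
        rw [sqGet_eq flat (ka / 5) ((ka % 5 + 4) % 5) (by omega) (by omega),
          sqGet_eq flat (kb / 5) ((kb % 5 + 4) % 5) (by omega) (by omega),
          sqGet_eq flat ((ka / 5 + 4) % 5) (ka % 5) (by omega) (by omega),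
          sqGet_eq flat ((kb / 5 + 4) % 5) (kb % 5) (by omega) (by omega),
          sqGet_eq flat (ka / 5) (kb % 5) (by omega) (by omega),
          sqGet_eq flat (kb / 5) (ka % 5) (by omega) (by omega)]

-- decrypt_playfair over A's square is _decrypt over B's flat square
theorem decrypt_eq (cipher key : String) :
    decryptPlayfair cipher (generatePlayfairSquare key) = decryptB cipher (squareB key) := by
  unfold decryptPlayfair decryptB
  rw [generatePlayfairSquare_eq, decPairs_eq _ (le_of_eq (squareB_length key)),
    show upperJI cipher.toList = normB cipher.toList from rfl, pairsB_eq]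

-- every candidate extends the prefix it was generated from and has length n
theorem candsB_shape (n : Int) : ∀ (N : Nat) (rem : List String) (pref s : String),
    rem.length ≤ N → s ∈ candsB rem pref n →
    (∃ t, s = pref ++ t) ∧ PySem.Str.len s = n := by
  intro N
  induction N with
  | zero =>
    intro rem pref s hlen hmem
    have hrem : rem = [] := List.length_eq_zero_iff.mp (Nat.le_zero.mp hlen)
    subst hrem
    rw [candsB_eq] at hmem
    by_cases hn : PySem.Str.len pref = n
    · rw [if_pos hn] at hmem
      have hs : s = pref := by simpa using hmem
      exact ⟨⟨"", by rw [String.append_empty]; exact hs⟩, by rw [hs]; exact hn⟩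
    · rw [if_neg hn, candsLoopB_nil] at hmem
      exact absurd hmem (by simp)
  | succ N ih =>
    have aux : ∀ (right left : List String) (pref s : String),
        left.length + right.length ≤ N + 1 →
        s ∈ candsLoopB left right pref n →
        (∃ t, s = pref ++ t) ∧ PySem.Str.len s = n := by
      intro right
      induction right with
      | nil =>
        intro left pref s _ hmem
        rw [candsLoopB_nil] at hmem
        exact absurd hmem (by simp)
      | cons c rest ihr =>
        intro left pref s hb hmem
        rw [candsLoopB_cons] at hmem
        rcases List.mem_append.mp hmem with hm | hm
        · obtain ⟨⟨t, ht⟩, hl⟩ :=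
            ih (left ++ rest) (pref ++ c) s (by simp at hb ⊢; omega) hm
          exact ⟨⟨c ++ t, by rw [ht, String.append_assoc]⟩, hl⟩
        · exact ihr (left ++ [c]) pref s (by simp at hb ⊢; omega) hm
    intro rem pref s hlen hmem
    rw [candsB_eq] at hmem
    by_cases hn : PySem.Str.len pref = n
    · rw [if_pos hn] at hmem
      have hs : s = pref := by simpa using hmem
      exact ⟨⟨"", by rw [String.append_empty]; exact hs⟩, by rw [hs]; exact hn⟩
    · rw [if_neg hn] at hmem
      exact aux rem [] pref s (by simpa using hlen) hmem

-- B's test, as the find? predicate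
theorem find?_singleton (p : String → Bool) (x : String) :
    List.find? p [x] = if p x then some x else none := by
  cases hp : p x <;> simp [List.find?, hp]

-- the length-n base case: A's test on pref is B's find? over the singleton [pref]
theorem pdBase_eq (cipher expected pref : String) :
    (match decryptPlayfair cipher (generatePlayfairSquare pref) with
      | some pt => if pt = expected then some pref else none
      | none => none) =
    List.find? (fun key =>
        match decryptB cipher (squareB key) with
        | some pt => pt == expected
        | none => false) [pref] := by
  rw [decrypt_eq, find?_singleton]
  cases hd : decryptB cipher (squareB pref) with
  | none => simp
  | some pt => by_cases hpt : pt = expected <;> simp [hpt]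

-- A's search equals "first candidate that decrypts to the expected plaintext"
theorem pdGo_eq_find (n : Int) (cipher expected : String) :
    ∀ (N : Nat) (chars : List String) (pref : String), chars.length ≤ N →
      pdGo n cipher expected chars pref =
        (candsB chars pref n).find? (fun key =>
          match decryptB cipher (squareB key) with
          | some pt => pt == expected
          | none => false) := by
  intro N
  induction N with
  | zero =>
    intro chars pref hlen
    have hchars : chars = [] := List.length_eq_zero_iff.mp (Nat.le_zero.mp hlen)
    subst hchars
    rw [pdGo_eq, candsB_eq]
    by_cases hn : PySem.Str.len pref = n
    · rw [if_pos hn, if_pos hn]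
      exact pdBase_eq cipher expected pref
    · rw [if_neg hn, if_neg hn, pdLoop_nil, candsLoopB_nil]
      rfl
  | succ N ih =>
    have aux : ∀ (right left : List String) (pref : String),
        left.length + right.length ≤ N + 1 → ¬ PySem.Str.len pref = n →
        pdLoop n cipher expected left right pref =
          (candsLoopB left right pref n).find? (fun key =>
            match decryptB cipher (squareB key) with
            | some pt => pt == expected
            | none => false) := by
      intro right
      induction right with
      | nil =>
        intro left pref _ _
        rw [pdLoop_nil, candsLoopB_nil]
        rfl
      | cons c rest ihr =>
        intro left pref hb hn
        rw [pdLoop_cons, candsLoopB_cons, List.find?_append,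
          ih (left ++ rest) (pref ++ c) (by simp at hb ⊢; omega)]
        cases hf : (candsB (left ++ rest) (pref ++ c) n).find? (fun key =>
            match decryptB cipher (squareB key) with
            | some pt => pt == expected
            | none => false) with
        | none =>
          rw [show (match (none : Option String) with
              | some k => if k = "" then pdLoop n cipher expected (left ++ [c]) rest pref else some k
              | none => pdLoop n cipher expected (left ++ [c]) rest pref) =
            pdLoop n cipher expected (left ++ [c]) rest pref from rfl]
          rw [ihr (left ++ [c]) pref (by simp at hb ⊢; omega) hn]
          simp
        | some k =>
          have hk := List.mem_of_find?_eq_some hf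
          obtain ⟨⟨t, ht⟩, hlenk⟩ :=
            candsB_shape n (left ++ rest).length (left ++ rest) (pref ++ c) k le_rfl hk
          have hne : k ≠ "" := by
            intro hke
            apply hn
            have h0 : PySem.Str.len ("" : String) = 0 := rfl
            have hlen2 := congrArg PySem.Str.len ht
            rw [hke, h0, PySem.Str.len_append, PySem.Str.len_append,
              PySem.Str.len_eq pref, PySem.Str.len_eq c, PySem.Str.len_eq t] at hlen2
            rw [hke, h0] at hlenk
            rw [PySem.Str.len_eq pref]
            omega
          rw [show (match (some k : Option String) with
              | some k => if k = "" then pdLoop n cipher expected (left ++ [c]) rest pref else some k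
              | none => pdLoop n cipher expected (left ++ [c]) rest pref) =
            (if k = "" then pdLoop n cipher expected (left ++ [c]) rest pref else some k) from rfl]
          rw [if_neg hne]
          simp
    intro chars pref hlen
    rw [pdGo_eq, candsB_eq]
    by_cases hn : PySem.Str.len pref = n
    · rw [if_pos hn, if_pos hn]
      exact pdBase_eq cipher expected pref
    · rw [if_neg hn, if_neg hn]
      exact aux chars [] pref (by simpa using hlen) hn

-- ===== VERDICT (by name: the statement is the Claim_ definition above) =====
theorem permute_and_decrypt_spec : Claim_equal_permute_and_decrypt := by
  intro characters prefix_ n ciphertext expected_plaintext _ _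
  unfold Spec_permute_and_decrypt permute_and_decrypt permute_and_decrypt_alt
  exact pdGo_eq_find n ciphertext expected_plaintext characters.length characters prefix_ le_rfl
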